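-- pv_equiv track=rewrite | github.com/Kevin-G-Chen/UORCA | main_workflow/run_helpers/submit_datasets.py | _checkpoint_summary
-- ===== SOURCE A (Python) =====
-- def _checkpoint_summary(checkpoints):
--     """Helper function to summarize checkpoint status without early breaks."""
--     completed = failed = 0
--     furthest = None
--     for name, cp in checkpoints.items():
--         status = cp.get("status", "not_started")
--         err_msg = cp.get("error_message")
--         if status == "completed" and not err_msg:
--             completed += 1
--             furthest = name
--         elif status == "failed" or err_msg:
--             failed += 1
--     return completed, failed, furthest
-- ===== SOURCE B (Python) =====
-- def _classify(cp):
--     """Map one checkpoint record to a single tag."""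
--     if cp.get("status", "not_started") == "completed" and not cp.get("error_message"):
--         return "completed"
--     if cp.get("status", "not_started") == "failed" or cp.get("error_message"):
--         return "failed"
--     return "other"
--
-- def _checkpoint_summary(checkpoints):
--     """Classify-then-aggregate: tag each item, tally tags in a dict,
--     then search the tag list backwards (early exit) for the furthest completed name."""
--     tags = [(name, _classify(cp)) for name, cp in checkpoints.items()]
--     counts = {}
--     for _, tag in tags:
--         counts[tag] = counts.get(tag, 0) + 1
--     furthest = None
--     for name, tag in reversed(tags):
--         if tag == "completed":
--             furthest = name
--             break
--     return counts.get("completed", 0), counts.get("failed", 0), furthest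
-- ===== Notes on version B (the rewrite author's own statement) =====
-- stated objective: alternative
-- what changed: Replaces A's single forward loop with three interleaved mutable accumulators by a classify-then-aggregate pipeline: each checkpoint is first mapped to a tag, the tags are tallied in a dict, and the furthest name is found by a backward early-exit search over the tag list.
import Mathlib
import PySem

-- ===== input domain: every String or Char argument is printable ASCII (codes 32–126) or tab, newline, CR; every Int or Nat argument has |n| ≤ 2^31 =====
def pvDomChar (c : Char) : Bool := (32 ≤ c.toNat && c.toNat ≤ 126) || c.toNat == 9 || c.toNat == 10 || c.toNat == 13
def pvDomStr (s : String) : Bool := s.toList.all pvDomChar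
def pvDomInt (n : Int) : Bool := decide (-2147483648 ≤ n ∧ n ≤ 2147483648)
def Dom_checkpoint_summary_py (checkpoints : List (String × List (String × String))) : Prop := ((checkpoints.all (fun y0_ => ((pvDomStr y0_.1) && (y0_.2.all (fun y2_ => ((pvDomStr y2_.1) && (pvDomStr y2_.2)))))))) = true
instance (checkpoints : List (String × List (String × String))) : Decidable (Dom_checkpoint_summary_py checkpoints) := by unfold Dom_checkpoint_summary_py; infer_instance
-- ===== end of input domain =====

-- B replaces A's interleaved accumulator loop by classify → dict tally → backward search; equivalence on all inputs.

-- ===== PORT A =====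
-- cp.get(k, dflt): first-match association-list lookup (dicts here have unique keys)
def pvGetD (cp : List (String × String)) (k dflt : String) : String :=
  (List.lookup k cp).getD dflt

def pvGet? (cp : List (String × String)) (k : String) : Option String :=
  List.lookup k cp

-- Python truthiness of cp.get("error_message"): None or "" is falsy
def pvFalsy (o : Option String) : Bool :=
  match o with
  | none => true
  | some s => s == ""

-- the single forward loop of A, carried state (completed, failed, furthest)
def checkpoint_summary_py (checkpoints : List (String × List (String × String))) : Int × Int × Option String :=
  checkpoints.foldl
    (fun st p =>
      let status := pvGetD p.2 "status" "not_started"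
      let err := pvGet? p.2 "error_message"
      if status == "completed" && pvFalsy err then
        (st.1 + 1, st.2.1, some p.1)
      else if status == "failed" || !(pvFalsy err) then
        (st.1, st.2.1 + 1, st.2.2)
      else st)
    (0, 0, none)

-- ===== PORT B =====
-- _classify: one checkpoint record → a tag
def pvClassify (cp : List (String × String)) : String :=
  if pvGetD cp "status" "not_started" == "completed" && pvFalsy (pvGet? cp "error_message") then "completed"
  else if pvGetD cp "status" "not_started" == "failed" || !(pvFalsy (pvGet? cp "error_message")) then "failed"
  else "other"

-- tag list → dict tally → backward early-exit search (the for/break loop = first match on the reversed list)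
def checkpoint_summary_py_alt (checkpoints : List (String × List (String × String))) : Int × Int × Option String :=
  let tags := checkpoints.map (fun p => (p.1, pvClassify p.2))
  let counts := tags.foldl (fun d t => d.insert t.2 (d.getD t.2 0 + 1)) (PySem.Dict.empty : PySem.Dict String Int)
  let furthest := (tags.reverse.find? (fun t => t.2 == "completed")).map Prod.fst
  (counts.getD "completed" 0, counts.getD "failed" 0, furthest)

-- ===== PRECONDITION & SPEC =====
def Spec_checkpoint_summary_py (checkpoints : List (String × List (String × String))) (out : Int × Int × Option String) : Prop := out = checkpoint_summary_py_alt checkpoints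
instance (checkpoints : List (String × List (String × String))) (out : Int × Int × Option String) : Decidable (Spec_checkpoint_summary_py checkpoints out) := by unfold Spec_checkpoint_summary_py; infer_instance

-- ===== CLAIM (what is proved, stated in full; the proofs are below) =====
def Claim_equal_checkpoint_summary_py : Prop := ∀ (checkpoints : List (String × List (String × String))), Dom_checkpoint_summary_py checkpoints → Spec_checkpoint_summary_py checkpoints (checkpoint_summary_py checkpoints)

-- ===== LEMMAS AND PROOFS =====

-- loop invariant: A's fold from any accumulator, expressed through tag counts and the reversed-tag search
lemma pv_fold_char (l : List (String × List (String × String))) (c f : Int) (fur : Option String) :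
    l.foldl
      (fun st p =>
        let status := pvGetD p.2 "status" "not_started"
        let err := pvGet? p.2 "error_message"
        if status == "completed" && pvFalsy err then
          (st.1 + 1, st.2.1, some p.1)
        else if status == "failed" || !(pvFalsy err) then
          (st.1, st.2.1 + 1, st.2.2)
        else st)
      (c, f, fur)
    = (c + ((l.map (fun p => pvClassify p.2)).count "completed" : Int),
       f + ((l.map (fun p => pvClassify p.2)).count "failed" : Int),
       Option.or (((l.map (fun p => (p.1, pvClassify p.2))).reverse.find?
                    (fun t => t.2 == "completed")).map Prod.fst) fur) := by
  induction l generalizing c f fur with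
  | nil => simp
  | cons hd tl ih =>
    simp only [List.foldl_cons, List.map_cons, List.reverse_cons, List.find?_append]
    by_cases hc : (pvGetD hd.2 "status" "not_started" == "completed" && pvFalsy (pvGet? hd.2 "error_message")) = true
    · have hcl : pvClassify hd.2 = "completed" := by simp [pvClassify, hc]
      simp only [hc, if_true, hcl]
      rw [ih]
      refine Prod.ext ?_ (Prod.ext ?_ ?_)
      · simp; ring
      · simp
      · simp only [List.find?_cons, List.find?_nil]
        norm_num
        cases h : (tl.map (fun p => (p.1, pvClassify p.2))).reverse.find? (fun t => t.2 == "completed") <;>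
          simp
    · have hc' := hc
      simp only [Bool.not_eq_true] at hc'
      simp only [hc', Bool.false_eq_true, if_false]
      by_cases hf : (pvGetD hd.2 "status" "not_started" == "failed" || !(pvFalsy (pvGet? hd.2 "error_message"))) = true
      · have hcl : pvClassify hd.2 = "failed" := by simp [pvClassify, hc', hf]
        simp only [hf, if_true, hcl]
        rw [ih]
        refine Prod.ext ?_ (Prod.ext ?_ ?_)
        · simp
        · simp; ring
        · simp only [List.find?_cons, List.find?_nil]
          cases h : (tl.map (fun p => (p.1, pvClassify p.2))).reverse.find? (fun t => t.2 == "completed") <;>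
            simp [Option.or]
      · have hf' := hf
        simp only [Bool.not_eq_true] at hf'
        have hcl : pvClassify hd.2 = "other" := by simp [pvClassify, hc', hf']
        simp only [hf', Bool.false_eq_true, if_false, hcl]
        rw [ih]
        refine Prod.ext ?_ (Prod.ext ?_ ?_)
        · simp
        · simp
        · simp only [List.find?_cons, List.find?_nil]
          cases h : (tl.map (fun p => (p.1, pvClassify p.2))).reverse.find? (fun t => t.2 == "completed") <;>
            simp [Option.or]

-- B's dict tally read back as a list count
lemma pv_counts_getD (l : List (String × List (String × String))) (v : String) :
    ((l.map (fun p => (p.1, pvClassify p.2))).foldl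
        (fun d t => d.insert t.2 (d.getD t.2 0 + 1))
        (PySem.Dict.empty : PySem.Dict String Int)).getD v 0
      = ((l.map (fun p => pvClassify p.2)).count v : Int) := by
  have h := PySem.Dict.getD_foldl_insert_add_one
      (l := l.map (fun p => pvClassify p.2)) (d := (PySem.Dict.empty : PySem.Dict String Int)) (v := v)
  simp only [List.foldl_map] at h ⊢
  simpa using h

-- ===== VERDICT (by name: the statement is the Claim_ definition above) =====
theorem checkpoint_summary_py_spec : Claim_equal_checkpoint_summary_py := by
  intro checkpoints _
  unfold Spec_checkpoint_summary_py checkpoint_summary_py checkpoint_summary_py_alt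
  rw [pv_fold_char]
  simp [pv_counts_getD, Option.or_none]
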